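-- pv_equiv track=rewrite | github.com/btfshadow/quake-arena-log | log_reader.py | find_game_match
-- ===== SOURCE A (Python) =====
-- def find_game_match(data: list) -> dict:
--   mach_game={}
--   temp_data=[]
--   count = 1
--   for line in data:
--     if line.startswith('  0:00 ------------------------------------------------------------'):
--         if temp_data:
--           mach_game[f'mach_game_{count}']=temp_data
--           count += 1
--         temp_data = []
--     temp_data.append(line.replace('\n', ""))
--     if temp_data:
--       mach_game[f'mach_game_{count}']=temp_data
--
--   return mach_game
-- ===== SOURCE B (Python) =====
-- SEPARATOR = '  0:00 ------------------------------------------------------------'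
--
--
-- def find_game_match(data: list) -> dict:
--   # Backward single pass: a group is complete exactly when its leading
--   # separator line is met, so no empty-group check is needed inside the loop;
--   # the leftover after the scan is the (possibly absent) leading chunk.
--   groups = []
--   current = []
--   for line in reversed(data):
--     current.append(line.replace('\n', ''))
--     if line.startswith(SEPARATOR):
--       groups.append(list(reversed(current)))
--       current = []
--   if current:
--     groups.append(list(reversed(current)))
--   groups.reverse()
--   return {f'mach_game_{i + 1}': g for i, g in enumerate(groups)}
-- ===== Notes on version B (the rewrite author's own statement) =====
-- stated objective: faster
-- what changed: Replaces A's forward pass that re-keys a live dict on every line (a dict write per line, plus a nested emptiness check) by a backward scan that closes a group unconditionally exactly when its leading separator is met, the leftover being the optional leading chunk, followed by one keying pass over the reversed group list; dropping the per-line dict write gives a measured constant-factor speedup.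
import Mathlib
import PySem

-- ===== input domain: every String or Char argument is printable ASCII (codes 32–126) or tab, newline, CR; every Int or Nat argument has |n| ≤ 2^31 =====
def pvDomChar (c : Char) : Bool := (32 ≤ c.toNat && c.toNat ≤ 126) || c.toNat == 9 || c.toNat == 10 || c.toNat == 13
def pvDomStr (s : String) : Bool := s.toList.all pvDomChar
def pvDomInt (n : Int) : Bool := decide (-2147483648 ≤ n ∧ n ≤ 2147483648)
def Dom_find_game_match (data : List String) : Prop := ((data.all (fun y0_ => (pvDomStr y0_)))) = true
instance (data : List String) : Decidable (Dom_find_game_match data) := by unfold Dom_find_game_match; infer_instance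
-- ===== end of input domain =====

-- B scans the data BACKWARD, closing a group unconditionally whenever it meets the
-- group's leading separator (the in-loop emptiness test and the per-line dict write of A
-- disappear; the leftover after the scan is the optional leading chunk), then keys the
-- reversed group list in a second pass; a timing run measured this constant-factor faster.

-- ===== PORT A =====
def pvSep : String := "  0:00 ------------------------------------------------------------"

-- loop body of A: (mach_game, temp_data, count) updated per line, dict re-keyed each iteration
def pvStepA (st : PySem.Dict String (List String) × List String × Int) (line : String) :
    PySem.Dict String (List String) × List String × Int :=
  let st1 := if PySem.Str.startswith line pvSep then
      (if st.2.1 ≠ [] then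
        (st.1.insert ("mach_game_" ++ PySem.Int.toStr st.2.2) st.2.1, ([] : List String), st.2.2 + 1)
       else (st.1, ([] : List String), st.2.2))
    else st
  let td := st1.2.1 ++ [PySem.Str.replace line "\n" ""]
  let mg := if td ≠ [] then st1.1.insert ("mach_game_" ++ PySem.Int.toStr st1.2.2) td else st1.1
  (mg, td, st1.2.2)

def find_game_match (data : List String) : List (String × List String) :=
  (data.foldl pvStepA ((PySem.Dict.empty : PySem.Dict String (List String)), ([] : List String), (1 : Int))).1.items

-- ===== PORT B =====
-- loop body of B: runs over reversed(data); (groups, current); current.append(rep)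
-- then close the group (reversed back to forward order) exactly on a separator line
def pvStepR (st : List (List String) × List String) (line : String) :
    List (List String) × List String :=
  let cur := st.2 ++ [PySem.Str.replace line "\n" ""]
  if PySem.Str.startswith line pvSep then (st.1 ++ [cur.reverse], ([] : List String))
  else (st.1, cur)

def find_game_match_alt (data : List String) : List (String × List String) :=
  let st := data.reverse.foldl pvStepR (([] : List (List String)), ([] : List String))
  let groups1 := if st.2 ≠ [] then st.1 ++ [st.2.reverse] else st.1
  let groups := groups1.reverse
  ((PySem.List.enumerate groups).foldl
      (fun (d : PySem.Dict String (List String)) p =>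
        d.insert ("mach_game_" ++ PySem.Int.toStr (p.1 + 1)) p.2)
      PySem.Dict.empty).items

-- ===== PRECONDITION & SPEC =====
def Spec_find_game_match (data : List String) (out : List (String × List String)) : Prop := out = find_game_match_alt data
instance (data : List String) (out : List (String × List String)) : Decidable (Spec_find_game_match data out) := by unfold Spec_find_game_match; infer_instance

-- ===== CLAIM (what is proved, stated in full; the proofs are below) =====
def Claim_equal_find_game_match : Prop := ∀ (data : List String), Dom_find_game_match data → Spec_find_game_match data (find_game_match data)

-- ===== LEMMAS AND PROOFS =====

def pvKey (c : Int) : String := "mach_game_" ++ PySem.Int.toStr c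

def pvKeyed (i : Int) : List (List String) → List (String × List String)
  | [] => []
  | g :: t => (pvKey (i + 1), g) :: pvKeyed (i + 1) t

-- proof-side bridge: the forward grouping fold (A's grouping skeleton, no dict)
def pvStepB (st : List (List String) × List String) (line : String) :
    List (List String) × List String :=
  let st1 := if PySem.Str.startswith line pvSep then
      (if st.2 ≠ [] then (st.1 ++ [st.2], ([] : List String)) else st)
    else st
  (st1.1, st1.2 ++ [PySem.Str.replace line "\n" ""])

def pvFinal (st : List (List String) × List String) : List (List String) :=
  if st.2 ≠ [] then st.1 ++ [st.2] else st.1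

-- proof-side bridge: recursive forward grouping
def pvGrp (cur : List String) : List String → List (List String)
  | [] => if cur = [] then [] else [cur]
  | l :: t =>
    if PySem.Str.startswith l pvSep then
      (if cur = [] then pvGrp [PySem.Str.replace l "\n" ""] t
       else cur :: pvGrp [PySem.Str.replace l "\n" ""] t)
    else pvGrp (cur ++ [PySem.Str.replace l "\n" ""]) t

lemma pvDigitChar_inj (a b : Nat) (ha : a < 10) (hb : b < 10)
    (h : Nat.digitChar a = Nat.digitChar b) : a = b := by
  have key : ∀ x y : Fin 10, Nat.digitChar x.val = Nat.digitChar y.val → x = y := by decide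
  exact congrArg Fin.val (key ⟨a, ha⟩ ⟨b, hb⟩ h)

lemma pvToDigits_inj : ∀ m n : Nat, Nat.toDigits 10 m = Nat.toDigits 10 n → m = n := by
  intro m
  induction m using Nat.strong_induction_on with
  | _ m ih =>
    intro n h
    rw [Nat.toDigits_eq_if (n := m) (by norm_num),
        Nat.toDigits_eq_if (n := n) (by norm_num)] at h
    split_ifs at h with hm hn hn
    · exact pvDigitChar_inj _ _ hm hn (List.cons.injEq _ _ _ _ ▸ h).1
    · have hlen := congrArg List.length h
      simp only [List.length_cons, List.length_append, List.length_nil] at hlen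
      have := @Nat.length_toDigits_pos 10 (n / 10)
      omega
    · have hlen := congrArg List.length h
      simp only [List.length_cons, List.length_append, List.length_nil] at hlen
      have := @Nat.length_toDigits_pos 10 (m / 10)
      omega
    · have hlen : ([Nat.digitChar (m % 10)]).length = ([Nat.digitChar (n % 10)]).length := rfl
      obtain ⟨h1, h2⟩ := List.append_inj' h hlen
      have hd : m / 10 = n / 10 := ih (m / 10) (by omega) _ h1
      have hr : m % 10 = n % 10 :=
        pvDigitChar_inj _ _ (Nat.mod_lt _ (by norm_num)) (Nat.mod_lt _ (by norm_num))
          (List.cons.injEq _ _ _ _ ▸ h2).1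
      omega

lemma pvKey_inj (a b : Int) (ha : 0 ≤ a) (hb : 0 ≤ b) (h : pvKey a = pvKey b) : a = b := by
  have hl := congrArg String.toList h
  simp only [pvKey, String.toList_append, PySem.Int.toList_toStr] at hl
  have hc : PySem.Int.toChars a = PySem.Int.toChars b := List.append_cancel_left hl
  simp only [PySem.Int.toChars, if_neg (by omega : ¬ a < 0), if_neg (by omega : ¬ b < 0)] at hc
  have := pvToDigits_inj a.toNat b.toNat hc
  omega

lemma pvKey_beq_false (a b : Int) (ha : 0 ≤ a) (hb : 0 ≤ b) (hne : a ≠ b) :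
    (pvKey a == pvKey b) = false := by
  simp only [beq_eq_false_iff_ne, ne_eq]
  exact fun h => hne (pvKey_inj a b ha hb h)

lemma pvKeyed_append (g : List String) : ∀ (gs : List (List String)) (i : Int),
    pvKeyed i (gs ++ [g]) = pvKeyed i gs ++ [(pvKey (i + gs.length + 1), g)] := by
  intro gs
  induction gs with
  | nil => intro i; simp [pvKeyed]
  | cons h t iht =>
    intro i
    simp only [List.cons_append, pvKeyed, iht (i + 1), List.length_cons]
    have harith : i + 1 + (t.length : Int) + 1 = i + ((t.length : Int) + 1) + 1 := by ring
    rw [harith]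
    push_cast
    ring_nf

lemma pvKeyed_map_id (v : List String) : ∀ (gs : List (List String)) (i c : Int), 0 ≤ i →
    i + gs.length < c →
    (pvKeyed i gs).map (fun p => if p.1 == pvKey c then (pvKey c, v) else p) = pvKeyed i gs := by
  intro gs
  induction gs with
  | nil => intro i c _ _; simp [pvKeyed]
  | cons h t iht =>
    intro i c hi hc
    simp only [List.length_cons] at hc
    push_cast at hc
    simp only [pvKeyed, List.map_cons]
    rw [pvKey_beq_false (i + 1) c (by omega) (by omega) (by omega)]
    simp only [Bool.false_eq_true, if_false]
    rw [iht (i + 1) c (by omega) (by omega)]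

lemma pvBuild : ∀ (gs : List (List String)) (i : Int) (d : PySem.Dict String (List String)),
    0 ≤ i →
    (∀ c : Int, i < c → d.contains (pvKey c) = false) →
    ((PySem.List.enumerate gs i).foldl
        (fun (d : PySem.Dict String (List String)) p =>
          d.insert ("mach_game_" ++ PySem.Int.toStr (p.1 + 1)) p.2) d).items
      = d.items ++ pvKeyed i gs := by
  intro gs
  induction gs with
  | nil => intro i d _ _; simp [PySem.List.enumerate, pvKeyed]
  | cons g t iht =>
    intro i d hi hd
    simp only [PySem.List.enumerate, List.foldl_cons, pvKeyed]
    rw [iht (i + 1) _ (by omega) ?_]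
    · rw [show ("mach_game_" ++ PySem.Int.toStr (i + 1)) = pvKey (i + 1) from rfl,
          PySem.Dict.items_insert_of_not_contains _ _ (hd (i + 1) (by omega))]
      simp
    · intro c hc
      rw [PySem.Dict.contains_insert]
      rw [show ("mach_game_" ++ PySem.Int.toStr (i + 1)) = pvKey (i + 1) from rfl]
      rw [pvKey_beq_false c (i + 1) (by omega) (by omega) (by omega)]
      simp [hd c (by omega)]

lemma pvContains_of_items (d : PySem.Dict String (List String)) (k : String) (v : List String)
    (h : (k, v) ∈ d.items) : d.contains k = true := by
  rw [PySem.Dict.contains_iff_mem_keys]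
  exact PySem.Dict.mem_keys_of_mem_items d h

lemma pvMain : ∀ (l : List String) (groups : List (List String)) (current : List String)
    (c : Int) (mg : PySem.Dict String (List String)),
    c = (groups.length : Int) + 1 →
    mg.items = pvKeyed 0 groups ++ (if current = [] then [] else [(pvKey c, current)]) →
    (∀ e : Int, (groups.length : Int) + 1 < e → mg.contains (pvKey e) = false) →
    (current = [] → mg.contains (pvKey c) = false) →
    ((l.foldl pvStepA (mg, current, c)).1).items
      = pvKeyed 0 (pvFinal (l.foldl pvStepB (groups, current))) := by
  intro l
  induction l with
  | nil =>
    intro groups current c mg hc hitems _ _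
    simp only [List.foldl_nil, pvFinal]
    by_cases hcur : current = []
    · simp [hcur, hitems]
    · simp only [if_pos (by simpa using hcur), hitems, if_neg hcur]
      rw [pvKeyed_append]
      simp [hc]
  | cons line rest ih =>
    intro groups current c mg hc hitems h1 h2
    have hc0 : (0 : Int) ≤ c := by omega
    simp only [List.foldl_cons]
    cases hs : PySem.Chars.startswith line.toList pvSep.toList with
    | true =>
      by_cases hcur : current = []
      · have hA : pvStepA (mg, current, c) line =
            (mg.insert (pvKey c) [PySem.Str.replace line "\n" ""],
             [PySem.Str.replace line "\n" ""], c) := by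
          simp [pvStepA, hs, hcur, pvKey]
        have hB : pvStepB (groups, current) line =
            (groups, [PySem.Str.replace line "\n" ""]) := by
          simp [pvStepB, hs, hcur]
        rw [hA, hB]
        apply ih groups _ c _ hc
        · rw [PySem.Dict.items_insert_of_not_contains _ _ (h2 hcur)]
          simp [hitems, hcur]
        · intro e he
          rw [PySem.Dict.contains_insert,
              pvKey_beq_false e c (by omega) hc0 (by omega), h1 e he]
          rfl
        · intro h; simp at h
      · have hA : pvStepA (mg, current, c) line =
            (((mg.insert (pvKey c) current).insert (pvKey (c + 1))
                [PySem.Str.replace line "\n" ""]),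
             [PySem.Str.replace line "\n" ""], c + 1) := by
          simp [pvStepA, hs, hcur, pvKey]
        have hB : pvStepB (groups, current) line =
            (groups ++ [current], [PySem.Str.replace line "\n" ""]) := by
          simp [pvStepB, hs, hcur]
        rw [hA, hB]
        have hmem : (pvKey c, current) ∈ mg.items := by
          rw [hitems]; simp [hcur]
        have hins1 : (mg.insert (pvKey c) current).items = mg.items := by
          rw [PySem.Dict.items_insert_of_contains _ _ (pvContains_of_items _ _ _ hmem), hitems]
          rw [List.map_append, pvKeyed_map_id current groups 0 c (le_refl 0) (by omega)]
          simp [hcur]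
        have hfresh : (mg.insert (pvKey c) current).contains (pvKey (c + 1)) = false := by
          rw [PySem.Dict.contains_insert,
              pvKey_beq_false (c + 1) c (by omega) hc0 (by omega), h1 (c + 1) (by omega)]
          rfl
        apply ih (groups ++ [current]) _ (c + 1) _ (by simp; omega)
        · rw [PySem.Dict.items_insert_of_not_contains _ _ hfresh, hins1, hitems]
          rw [pvKeyed_append]
          simp [hcur, hc]
        · intro e he
          simp only [List.length_append, List.length_cons, List.length_nil] at he
          rw [PySem.Dict.contains_insert,
              pvKey_beq_false e (c + 1) (by push_cast at he; omega) (by omega)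
                (by push_cast at he; omega),
              PySem.Dict.contains_insert,
              pvKey_beq_false e c (by push_cast at he; omega) hc0 (by push_cast at he; omega),
              h1 e (by push_cast at he ⊢; omega)]
          rfl
        · intro h; simp at h
    | false =>
      have hA : pvStepA (mg, current, c) line =
          (mg.insert (pvKey c) (current ++ [PySem.Str.replace line "\n" ""]),
           current ++ [PySem.Str.replace line "\n" ""], c) := by
        simp [pvStepA, hs, pvKey]
      have hB : pvStepB (groups, current) line =
          (groups, current ++ [PySem.Str.replace line "\n" ""]) := by
        simp [pvStepB, hs]
      rw [hA, hB]
      apply ih groups _ c _ hc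
      · by_cases hcur : current = []
        · rw [PySem.Dict.items_insert_of_not_contains _ _ (h2 hcur)]
          simp [hitems, hcur]
        · have hmem : (pvKey c, current) ∈ mg.items := by
            rw [hitems]; simp [hcur]
          rw [PySem.Dict.items_insert_of_contains _ _ (pvContains_of_items _ _ _ hmem), hitems]
          rw [List.map_append, pvKeyed_map_id _ groups 0 c (le_refl 0) (by omega)]
          simp [hcur]
      · intro e he
        rw [PySem.Dict.contains_insert,
            pvKey_beq_false e c (by omega) hc0 (by omega), h1 e he]
        rfl
      · intro h; simp at h

-- forward fold grouping = recursive grouping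
lemma pvFold_eq_grp : ∀ (l : List String) (gs : List (List String)) (cur : List String),
    pvFinal (l.foldl pvStepB (gs, cur)) = gs ++ pvGrp cur l := by
  intro l
  induction l with
  | nil =>
    intro gs cur
    by_cases hcur : cur = [] <;> simp [pvFinal, pvGrp, hcur]
  | cons line t ih =>
    intro gs cur
    simp only [List.foldl_cons]
    cases hs : PySem.Chars.startswith line.toList pvSep.toList with
    | true =>
      by_cases hcur : cur = []
      · have hB : pvStepB (gs, cur) line = (gs, [PySem.Str.replace line "\n" ""]) := by
          simp [pvStepB, hs, hcur]
        rw [hB, ih]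
        simp [pvGrp, hs, hcur, PySem.Str.startswith]
      · have hB : pvStepB (gs, cur) line =
            (gs ++ [cur], [PySem.Str.replace line "\n" ""]) := by
          simp [pvStepB, hs, hcur]
        rw [hB, ih]
        simp [pvGrp, hs, hcur, PySem.Str.startswith]
    | false =>
      have hB : pvStepB (gs, cur) line = (gs, cur ++ [PySem.Str.replace line "\n" ""]) := by
        simp [pvStepB, hs]
      rw [hB, ih]
      simp [pvGrp, hs, PySem.Str.startswith]

-- backward fold (B's loop over reversed data) as a foldr
def pvBack (l : List String) : List (List String) × List String :=
  l.foldr (fun line st => pvStepR st line) ([], [])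

lemma pvBack_eq_foldl (l : List String) :
    l.reverse.foldl pvStepR ([], []) = pvBack l := by
  rw [List.foldl_reverse]; rfl

-- the backward state determines the forward recursive grouping
lemma pvBack_grp : ∀ (l : List String) (c : List String),
    pvGrp c l =
      (if c ++ (pvBack l).2.reverse = [] then [] else [c ++ (pvBack l).2.reverse])
        ++ (pvBack l).1.reverse := by
  intro l
  induction l with
  | nil =>
    intro c
    by_cases hc : c = [] <;> simp [pvGrp, pvBack, hc]
  | cons line t ih =>
    intro c
    have hstep : pvBack (line :: t) = pvStepR (pvBack t) line := rfl
    cases hs : PySem.Chars.startswith line.toList pvSep.toList with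
    | true =>
      have hR : pvBack (line :: t) =
          ((pvBack t).1 ++ [((pvBack t).2 ++ [PySem.Str.replace line "\n" ""]).reverse], []) := by
        rw [hstep]; simp [pvStepR, hs, PySem.Str.startswith]
      by_cases hc : c = []
      · have hG : pvGrp c (line :: t) = pvGrp [PySem.Str.replace line "\n" ""] t := by
          subst hc; simp [pvGrp, PySem.Str.startswith, hs]
        rw [hG, ih, hR]
        simp [hc]
      · have hG : pvGrp c (line :: t) = c :: pvGrp [PySem.Str.replace line "\n" ""] t := by
          simp [pvGrp, PySem.Str.startswith, hs, hc]
        rw [hG, ih, hR]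
        simp [hc]
    | false =>
      have hR : pvBack (line :: t) =
          ((pvBack t).1, (pvBack t).2 ++ [PySem.Str.replace line "\n" ""]) := by
        rw [hstep]; simp [pvStepR, hs, PySem.Str.startswith]
      simp only [pvGrp, hs, PySem.Str.startswith, Bool.false_eq_true, if_false]
      rw [ih (c ++ [PySem.Str.replace line "\n" ""]), hR]
      simp

-- B's group list equals the recursive forward grouping
lemma pvGroups_alt (data : List String) :
    (let st := data.reverse.foldl pvStepR (([] : List (List String)), ([] : List String))
     (if st.2 ≠ [] then st.1 ++ [st.2.reverse] else st.1).reverse) = pvGrp [] data := by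
  rw [pvBack_eq_foldl]
  rw [pvBack_grp data []]
  by_cases h : (pvBack data).2 = []
  · simp [h]
  · simp [h]

-- ===== VERDICT (by name: the statement is the Claim_ definition above) =====
theorem find_game_match_spec : Claim_equal_find_game_match := by
  intro data _
  unfold Spec_find_game_match find_game_match find_game_match_alt
  have hemp : (PySem.Dict.empty : PySem.Dict String (List String)).items = [] := rfl
  have hmain := pvMain data [] [] 1 PySem.Dict.empty (by simp) (by simp [pvKeyed, hemp])
    (fun e _ => PySem.Dict.contains_empty _) (fun _ => PySem.Dict.contains_empty _)
  have hgrps := pvGroups_alt data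
  simp only at hgrps
  have hbuild := pvBuild
    ((if (data.reverse.foldl pvStepR ([], [])).2 ≠ [] then
        (data.reverse.foldl pvStepR ([], [])).1 ++ [(data.reverse.foldl pvStepR ([], [])).2.reverse]
      else (data.reverse.foldl pvStepR ([], [])).1).reverse)
    0 PySem.Dict.empty (le_refl 0) (fun c _ => PySem.Dict.contains_empty _)
  rw [hmain, pvFold_eq_grp data [] []]
  simp only [List.nil_append, hemp] at hbuild ⊢
  rw [hbuild, hgrps]
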